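-- pv_equiv track=rewrite | github.com/MadBuffoon/UltrawideDesert | lib/camera_mod.py | strip_header_comments
-- ===== SOURCE A (Python) =====
-- def strip_header_comments(xml_text):
--     """Strip Korean comment blocks at the top of the XML.
--
--     Creates ~700 bytes of zero-padding room for the size matcher.
--     """
--     lines = xml_text.split('\n')
--     result = []
--     in_comment = False
--     header_done = False
--
--     for line in lines:
--         stripped = line.strip()
--
--         if header_done:
--             result.append(line)
--             continue
--
--         if '<!--' in stripped and '-->' not in stripped:
--             in_comment = True
--             continue
--         if in_comment:
--             if '-->' in stripped:
--                 in_comment = False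
--             continue
--         if stripped.startswith('<!--') and stripped.endswith('-->'):
--             continue
--         if not stripped:
--             continue
--
--         header_done = True
--         result.append(line)
--
--     return '\n'.join(result)
-- ===== SOURCE B (Python) =====
-- def strip_header_comments(xml_text):
--     """Strip leading comment blocks / blank lines; return from the first real content line on."""
--     lines = xml_text.split('\n')
--     i, in_comment = 0, False
--     while i < len(lines):
--         s = lines[i].strip()
--         if in_comment:
--             in_comment = '-->' not in s
--         elif '<!--' in s and '-->' not in s:
--             in_comment = True
--         elif s and not (s.startswith('<!--') and s.endswith('-->')):
--             break
--         i += 1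
--     return '\n'.join(lines[i:])
-- ===== Notes on version B (the rewrite author's own statement) =====
-- stated objective: simpler
-- what changed: B keeps no result list: it only scans the header zone maintaining the comment flag, stops at the first real content line, and returns the joined suffix of lines from there, instead of A's full pass that appends every remaining line to an accumulator.
import Mathlib
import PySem

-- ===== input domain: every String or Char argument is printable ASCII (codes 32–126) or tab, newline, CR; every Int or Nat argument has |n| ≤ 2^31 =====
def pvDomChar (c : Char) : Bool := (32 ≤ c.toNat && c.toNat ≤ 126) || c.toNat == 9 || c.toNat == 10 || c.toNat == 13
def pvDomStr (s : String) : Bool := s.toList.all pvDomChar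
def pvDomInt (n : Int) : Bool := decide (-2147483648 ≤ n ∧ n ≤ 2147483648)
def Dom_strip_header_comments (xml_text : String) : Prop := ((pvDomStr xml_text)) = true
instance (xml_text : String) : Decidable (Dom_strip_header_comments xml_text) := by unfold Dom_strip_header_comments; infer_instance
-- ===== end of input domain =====

-- B replaces A's accumulate-every-line pass by: find the first content line, join the suffix from there (simpler).

-- ===== PORT A =====
-- state = (result, in_comment, header_done), exactly A's loop body; strings handled as List Char via PySem.Chars
def pvAStep (st : List (List Char) × Bool × Bool) (line : List Char) : List (List Char) × Bool × Bool :=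
  let result := st.1
  let in_comment := st.2.1
  let header_done := st.2.2
  let stripped := PySem.Chars.strip line
  if header_done then (result ++ [line], in_comment, header_done)
  else if PySem.Chars.isIn ['<','!','-','-'] stripped && !(PySem.Chars.isIn ['-','-','>'] stripped) then
    (result, true, header_done)
  else if in_comment then
    (result, (if PySem.Chars.isIn ['-','-','>'] stripped then false else in_comment), header_done)
  else if PySem.Chars.startswith stripped ['<','!','-','-'] && PySem.Chars.endswith stripped ['-','-','>'] then
    (result, in_comment, header_done)
  else if stripped = [] then
    (result, in_comment, header_done)
  else (result ++ [line], in_comment, true)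

def strip_header_comments (xml_text : String) : String :=
  let lines := PySem.Chars.splitOn xml_text.toList ['\n']
  let st := lines.foldl pvAStep ([], false, false)
  String.ofList (PySem.Chars.join ['\n'] st.1)

-- ===== PORT B =====
-- B's while loop: drop header lines, return the suffix of lines at the first content line
def pvBDrop (in_comment : Bool) : List (List Char) → List (List Char)
  | [] => []
  | line :: rest =>
    let s := PySem.Chars.strip line
    if in_comment then pvBDrop (!(PySem.Chars.isIn ['-','-','>'] s)) rest
    else if PySem.Chars.isIn ['<','!','-','-'] s && !(PySem.Chars.isIn ['-','-','>'] s) then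
      pvBDrop true rest
    else if s ≠ [] && !(PySem.Chars.startswith s ['<','!','-','-'] && PySem.Chars.endswith s ['-','-','>']) then
      line :: rest
    else pvBDrop in_comment rest

def strip_header_comments_alt (xml_text : String) : String :=
  String.ofList (PySem.Chars.join ['\n'] (pvBDrop false (PySem.Chars.splitOn xml_text.toList ['\n'])))

-- ===== PRECONDITION & SPEC =====
def Spec_strip_header_comments (xml_text : String) (out : String) : Prop := out = strip_header_comments_alt xml_text
instance (xml_text : String) (out : String) : Decidable (Spec_strip_header_comments xml_text out) := by unfold Spec_strip_header_comments; infer_instance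

-- ===== CLAIM (what is proved, stated in full; the proofs are below) =====
def Claim_equal_strip_header_comments : Prop := ∀ (xml_text : String), Dom_strip_header_comments xml_text → Spec_strip_header_comments xml_text (strip_header_comments xml_text)

-- ===== LEMMAS AND PROOFS =====

-- once header_done, A's loop just appends every remaining line
lemma pvA_post (ls : List (List Char)) : ∀ (res : List (List Char)) (ic : Bool),
    ls.foldl pvAStep (res, ic, true) = (res ++ ls, ic, true) := by
  induction ls with
  | nil => intro res ic; simp
  | cons l rest ih =>
    intro res ic
    simp only [List.foldl_cons, pvAStep]
    simpa using ih (res ++ [l]) ic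

-- in the header zone, A's fold computes res ++ (B's suffix)
lemma pvA_main (ls : List (List Char)) : ∀ (res : List (List Char)) (ic : Bool),
    (ls.foldl pvAStep (res, ic, false)).1 = res ++ pvBDrop ic ls := by
  induction ls with
  | nil => intro res ic; simp [pvBDrop]
  | cons l rest ih =>
    intro res ic
    simp only [List.foldl_cons, pvAStep, pvBDrop]
    by_cases hc : PySem.Chars.isIn ['-','-','>'] (PySem.Chars.strip l) = true
    · -- '-->' present: the open condition is false; an in-comment state closes
      cases ic with
      | true => simp [hc, ih]
      | false =>
        by_cases hfull : (PySem.Chars.startswith (PySem.Chars.strip l) ['<','!','-','-']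
            && PySem.Chars.endswith (PySem.Chars.strip l) ['-','-','>']) = true
        · simp [hc, hfull, ih]
        · by_cases hblank : PySem.Chars.strip l = []
          · simp [hblank, ih, (by decide : PySem.Chars.isIn ['<','!','-','-'] ([]:List Char) = false)]
          · simp [hc, hfull, hblank, pvA_post]
    · have hc' : PySem.Chars.isIn ['-','-','>'] (PySem.Chars.strip l) = false := by simpa using hc
      by_cases hop : PySem.Chars.isIn ['<','!','-','-'] (PySem.Chars.strip l) = true
      · cases ic with
        | true => simp [hc', hop, ih]
        | false => simp [hc', hop, ih]
      · have hop' : PySem.Chars.isIn ['<','!','-','-'] (PySem.Chars.strip l) = false := by simpa using hop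
        cases ic with
        | true => simp [hc', hop', ih]
        | false =>
          by_cases hfull : (PySem.Chars.startswith (PySem.Chars.strip l) ['<','!','-','-']
              && PySem.Chars.endswith (PySem.Chars.strip l) ['-','-','>']) = true
          · simp [hc', hop', hfull, ih]
          · by_cases hblank : PySem.Chars.strip l = []
            · simp [hblank, ih, (by decide : PySem.Chars.isIn ['<','!','-','-'] ([]:List Char) = false)]
            · simp [hc', hop', hfull, hblank, pvA_post]

-- ===== VERDICT (by name: the statement is the Claim_ definition above) =====
theorem strip_header_comments_spec : Claim_equal_strip_header_comments := by
  intro x _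
  unfold Spec_strip_header_comments strip_header_comments strip_header_comments_alt
  simp [pvA_main]
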